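-- pv_equiv track=rewrite | github.com/nayaab-dotcom/aura-project | AURA/main.py | _direct_path
-- ===== SOURCE A (Python) =====
-- from typing import List, Dict, Optional, Tuple
--
-- def _direct_path(start: tuple, goal: tuple, max_steps: int = 200) -> List[tuple]:
--     """Simple Manhattan fallback path if A* is blocked."""
--     x, y = start
--     gx, gy = goal
--     path = []
--     steps = 0
--     while (x, y) != (gx, gy) and steps < max_steps:
--         if x < gx: x += 1
--         elif x > gx: x -= 1
--         if y < gy: y += 1
--         elif y > gy: y -= 1
--         path.append((x, y))
--         steps += 1
--     return path
-- ===== SOURCE B (Python) =====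
-- from typing import List
--
-- def _direct_path(start: tuple, goal: tuple, max_steps: int = 200) -> List[tuple]:
--     """Closed-form Manhattan fallback path: each point computed directly from its index."""
--     sx, sy = start
--     gx, gy = goal
--     dx, dy = gx - sx, gy - sy
--     ax, ay = abs(dx), abs(dy)
--     ux = 1 if dx > 0 else (-1 if dx < 0 else 0)
--     uy = 1 if dy > 0 else (-1 if dy < 0 else 0)
--     n = max(0, min(max(ax, ay), max_steps))
--     return [(sx + ux * min(i, ax), sy + uy * min(i, ay)) for i in range(1, n + 1)]
-- ===== Notes on version B (the rewrite author's own statement) =====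
-- stated objective: alternative
-- what changed: Replaces A's stateful while loop of incremental +-1 coordinate updates by a closed-form comprehension: n = max(0, min(max(|dx|,|dy|), max_steps)) points computed directly as (sx + sgn(dx)*min(i,|dx|), sy + sgn(dy)*min(i,|dy|)).
import Mathlib
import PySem

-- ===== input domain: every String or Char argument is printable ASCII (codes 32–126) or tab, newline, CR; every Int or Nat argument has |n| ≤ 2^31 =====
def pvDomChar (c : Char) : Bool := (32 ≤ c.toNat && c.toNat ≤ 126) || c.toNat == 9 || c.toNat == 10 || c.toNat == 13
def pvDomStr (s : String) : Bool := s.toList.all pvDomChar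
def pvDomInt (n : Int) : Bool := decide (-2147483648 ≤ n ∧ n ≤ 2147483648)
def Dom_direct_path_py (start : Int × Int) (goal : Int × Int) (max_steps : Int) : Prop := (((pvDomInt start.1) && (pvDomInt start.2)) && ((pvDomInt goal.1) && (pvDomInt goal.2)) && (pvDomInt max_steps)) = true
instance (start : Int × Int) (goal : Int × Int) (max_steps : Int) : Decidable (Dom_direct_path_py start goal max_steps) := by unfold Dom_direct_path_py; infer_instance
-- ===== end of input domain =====

-- B replaces A's step-by-step while loop by a closed-form comprehension (same values; objective: alternative).

-- ===== PORT A =====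
-- the while loop of A: state (x, y, steps, path); terminates because max_steps - steps shrinks
def directPathLoop (gx gy : Int) (x y : Int) (steps : Int) (max_steps : Int)
    (path : List (Int × Int)) : List (Int × Int) :=
  if _h : ¬((x, y) = (gx, gy)) ∧ steps < max_steps then
    let x' := if x < gx then x + 1 else if gx < x then x - 1 else x
    let y' := if y < gy then y + 1 else if gy < y then y - 1 else y
    directPathLoop gx gy x' y' (steps + 1) max_steps (path ++ [(x', y')])
  else path
termination_by (max_steps - steps).toNat
decreasing_by omega

def direct_path_py (start : Int × Int) (goal : Int × Int) (max_steps : Int) : List (Int × Int) :=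
  directPathLoop goal.1 goal.2 start.1 start.2 0 max_steps []

-- ===== PORT B =====
def direct_path_py_alt (start : Int × Int) (goal : Int × Int) (max_steps : Int) : List (Int × Int) :=
  let sx := start.1; let sy := start.2
  let gx := goal.1; let gy := goal.2
  let dx := gx - sx; let dy := gy - sy
  let ax : Int := (dx.natAbs : Int)   -- abs(dx)
  let ay : Int := (dy.natAbs : Int)   -- abs(dy)
  let ux : Int := if 0 < dx then 1 else if dx < 0 then -1 else 0
  let uy : Int := if 0 < dy then 1 else if dy < 0 then -1 else 0
  let n := max 0 (min (max ax ay) max_steps)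
  (PySem.List.pyRange 1 (n + 1) 1).map
    (fun i => (sx + ux * min i ax, sy + uy * min i ay))

-- ===== PRECONDITION & SPEC =====
def Spec_direct_path_py (start : Int × Int) (goal : Int × Int) (max_steps : Int) (out : List (Int × Int)) : Prop := out = direct_path_py_alt start goal max_steps
instance (start : Int × Int) (goal : Int × Int) (max_steps : Int) (out : List (Int × Int)) : Decidable (Spec_direct_path_py start goal max_steps out) := by unfold Spec_direct_path_py; infer_instance

-- ===== CLAIM (what is proved, stated in full; the proofs are below) =====
def Claim_equal_direct_path_py : Prop := ∀ (start : Int × Int) (goal : Int × Int) (max_steps : Int), Dom_direct_path_py start goal max_steps → Spec_direct_path_py start goal max_steps (direct_path_py start goal max_steps)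

-- ===== LEMMAS AND PROOFS =====

-- the closed-form coordinate after k steps
def pvCoord (s g k : Int) : Int :=
  s + (if 0 < g - s then 1 else if g - s < 0 then -1 else 0) * min k ((g - s).natAbs : Int)

-- one loop step advances a coordinate from pvCoord k to pvCoord (k+1)
theorem pvCoord_step (s g k : Int) :
    (if pvCoord s g k < g then pvCoord s g k + 1
     else if g < pvCoord s g k then pvCoord s g k - 1 else pvCoord s g k)
      = pvCoord s g (k + 1) := by
  unfold pvCoord; split_ifs <;> omega

-- the coordinate has arrived iff k ≥ |g - s|
theorem pvCoord_eq_goal (s g k : Int) (_hk : 0 ≤ k) :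
    pvCoord s g k = g ↔ ((g - s).natAbs : Int) ≤ k := by
  unfold pvCoord; split_ifs <;> omega

-- loop invariant: from the state after k steps, the loop appends exactly the remaining closed-form points
theorem directPathLoop_eq (sx sy gx gy max_steps : Int) :
    ∀ (m : Nat) (k : Int), (max_steps - k).toNat ≤ m → 0 ≤ k → ∀ (path : List (Int × Int)),
      directPathLoop gx gy (pvCoord sx gx k) (pvCoord sy gy k) k max_steps path
        = path ++ (PySem.List.pyRange (k + 1)
            (max 0 (min (max ((gx - sx).natAbs : Int) ((gy - sy).natAbs : Int)) max_steps) + 1) 1).map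
            (fun i => (pvCoord sx gx i, pvCoord sy gy i)) := by
  intro m
  induction m with
  | zero =>
    intro k hm hk path
    rw [directPathLoop]
    have hms : max_steps ≤ k := by omega
    rw [dif_neg (by intro h; exact absurd h.2 (by omega))]
    rw [PySem.List.pyRange_one_eq_nil (by omega)]
    simp
  | succ m ih =>
    intro k hm hk path
    rw [directPathLoop]
    by_cases hc : ¬((pvCoord sx gx k, pvCoord sy gy k) = (gx, gy)) ∧ k < max_steps
    · rw [dif_pos hc]
      have hne : ¬(((gx - sx).natAbs : Int) ≤ k ∧ ((gy - sy).natAbs : Int) ≤ k) := by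
        intro h
        exact hc.1 (by
          rw [Prod.mk.injEq]
          exact ⟨(pvCoord_eq_goal sx gx k hk).2 h.1, (pvCoord_eq_goal sy gy k hk).2 h.2⟩)
      have hkn : k + 1 ≤ max 0 (min (max ((gx - sx).natAbs : Int) ((gy - sy).natAbs : Int)) max_steps) := by
        omega
      rw [pvCoord_step sx gx k, pvCoord_step sy gy k]
      rw [ih (k + 1) (by omega) (by omega) (path ++ [(pvCoord sx gx (k + 1), pvCoord sy gy (k + 1))])]
      conv_rhs => rw [PySem.List.pyRange_one_cons (show k + 1 < max 0 (min (max ((gx - sx).natAbs : Int) ((gy - sy).natAbs : Int)) max_steps) + 1 by omega)]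
      simp
    · rw [dif_neg hc]
      by_cases hlt : k < max_steps
      · have heq : (pvCoord sx gx k, pvCoord sy gy k) = (gx, gy) := by
          by_contra hne; exact hc ⟨hne, hlt⟩
        rw [Prod.mk.injEq] at heq
        have hx := (pvCoord_eq_goal sx gx k hk).1 heq.1
        have hy := (pvCoord_eq_goal sy gy k hk).1 heq.2
        rw [PySem.List.pyRange_one_eq_nil (by omega)]
        simp
      · rw [PySem.List.pyRange_one_eq_nil (by omega)]
        simp

-- ===== VERDICT (by name: the statement is the Claim_ definition above) =====
theorem direct_path_py_spec : Claim_equal_direct_path_py := by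
  intro start goal max_steps _
  show direct_path_py start goal max_steps = direct_path_py_alt start goal max_steps
  unfold direct_path_py direct_path_py_alt
  have h0x : start.1 = pvCoord start.1 goal.1 0 := by unfold pvCoord; split_ifs <;> omega
  have h0y : start.2 = pvCoord start.2 goal.2 0 := by unfold pvCoord; split_ifs <;> omega
  rw [h0x, h0y, directPathLoop_eq start.1 start.2 goal.1 goal.2 max_steps
        (max_steps - 0).toNat 0 (le_refl _) (le_refl _) []]
  simp [pvCoord]
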